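-- pv_equiv track=rewrite | github.com/AAIR-lab/DAAISy | generate_random_init_domains.py | get_INFO_STRING
-- ===== SOURCE A (Python) =====
-- def get_INFO_STRING(sampled_PALs, num_incorrect_pals):
--     action_to_PAL_changed = dict()
--     INFO_STRING = "\n"
--     for PAL in sampled_PALs:
--         predicate = PAL[0]
--         action = PAL[1]
--         if action not in action_to_PAL_changed:
--             action_to_PAL_changed[action] = list()
--         action_to_PAL_changed[action].append(PAL)
--     for action_name, PALs in action_to_PAL_changed.items():
--         INFO_STRING += ";; "+str(action_name)+" action has changed: "
--         for PAL in PALs: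
--             INFO_STRING += str(PAL[0])+", "
--         INFO_STRING += "\n"
--     return INFO_STRING
-- ===== SOURCE B (Python) =====
-- def get_INFO_STRING(sampled_PALs, num_incorrect_pals):
--     # recursive partition: peel off the first PAL's action with its whole group,
--     # emit that action's line, recurse on the remaining PALs (no grouping dict)
--     def emit(pals):
--         if not pals:
--             return ""
--         action = pals[0][1]
--         same = [p for p in pals if p[1] == action]
--         rest = [p for p in pals if p[1] != action]
--         return (";; " + action + " action has changed: "
--                 + "".join(p[0] + ", " for p in same) + "\n" + emit(rest))
--     return "\n" + emit(sampled_PALs)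
-- ===== Notes on version B (the rewrite author's own statement) =====
-- stated objective: alternative
-- what changed: B replaces A's grouping-dict-then-report loops by a recursive partition: it peels off the first PAL's action together with its whole group, emits that action's line, and recurses on the remaining PALs, so no dict or grouping structure is ever built.
import Mathlib
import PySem

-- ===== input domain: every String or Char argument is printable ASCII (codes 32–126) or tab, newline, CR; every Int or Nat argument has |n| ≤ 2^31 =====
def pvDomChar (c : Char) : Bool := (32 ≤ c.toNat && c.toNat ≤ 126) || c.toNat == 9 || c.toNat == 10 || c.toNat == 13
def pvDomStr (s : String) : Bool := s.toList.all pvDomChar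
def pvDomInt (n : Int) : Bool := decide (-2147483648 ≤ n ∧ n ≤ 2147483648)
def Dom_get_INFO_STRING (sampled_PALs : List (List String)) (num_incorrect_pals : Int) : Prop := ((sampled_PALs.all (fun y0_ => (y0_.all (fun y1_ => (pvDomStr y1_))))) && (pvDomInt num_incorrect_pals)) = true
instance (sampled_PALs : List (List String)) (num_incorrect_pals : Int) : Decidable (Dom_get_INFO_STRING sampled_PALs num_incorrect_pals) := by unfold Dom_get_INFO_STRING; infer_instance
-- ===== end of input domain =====

-- B replaces A's grouping dict + report loops with a recursive partition: peel off the
-- first PAL's action together with its whole group, emit its line, recurse on the rest.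

-- ===== PORT A =====
def get_INFO_STRING (sampled_PALs : List (List String)) (num_incorrect_pals : Int) : String :=
  let d : PySem.Dict String (List (List String)) :=
    sampled_PALs.foldl (fun d PAL =>
      let _predicate := PySem.List.pyGetD PAL 0 ""   -- PAL[0] (bound but unused, as in A; total stand-in, Pre_ keeps the index in range)
      let action := PySem.List.pyGetD PAL 1 ""       -- PAL[1] (Pre_ keeps the index in range)
      let d := if d.contains action then d else d.insert action []
      d.modify action [] (fun l => l ++ [PAL])) PySem.Dict.empty
  d.items.foldl (fun s item =>
    let s := s ++ ";; " ++ item.1 ++ " action has changed: "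
    let s := item.2.foldl (fun s PAL => s ++ PySem.List.pyGetD PAL 0 "" ++ ", ") s
    s ++ "\n") "\n"

-- ===== PORT B =====
-- helper `emit` of Source B: partition off the first action's group, recurse on the rest
def pvEmit : List (List String) → String
  | [] => ""
  | p :: rest' =>
    let action := PySem.List.pyGetD p 1 ""            -- pals[0][1] (Pre_ keeps the index in range)
    let same := (p :: rest').filter (fun q => PySem.List.pyGetD q 1 "" == action)
    let rest := (p :: rest').filter (fun q => !(PySem.List.pyGetD q 1 "" == action))
    ";; " ++ action ++ " action has changed: " ++
      String.join (same.map (fun q => PySem.List.pyGetD q 0 "" ++ ", ")) ++ "\n" ++ pvEmit rest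
termination_by pals => pals.length
decreasing_by
  simp only [List.filter_cons, beq_self_eq_true, Bool.not_true, List.length_cons]
  exact Nat.lt_succ_of_le (List.length_filter_le _ _)

def get_INFO_STRING_alt (sampled_PALs : List (List String)) (num_incorrect_pals : Int) : String :=
  "\n" ++ pvEmit sampled_PALs

-- ===== PRECONDITION & SPEC =====
-- A raises IndexError (PAL[0]/PAL[1]) on any inner list of length < 2; exactly those inputs are excluded.
def Pre_get_INFO_STRING (sampled_PALs : List (List String)) (num_incorrect_pals : Int) : Prop :=
  ∀ PAL ∈ sampled_PALs, 2 ≤ PAL.length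
instance (sampled_PALs : List (List String)) (num_incorrect_pals : Int) : Decidable (Pre_get_INFO_STRING sampled_PALs num_incorrect_pals) := by unfold Pre_get_INFO_STRING; infer_instance
def pvWitness_get_INFO_STRING : List (List String) × Int :=
  ([["p1", "a1"], ["p2", "a1"], ["p3", "a2"]], 0)
def Spec_get_INFO_STRING (sampled_PALs : List (List String)) (num_incorrect_pals : Int) (out : String) : Prop := out = get_INFO_STRING_alt sampled_PALs num_incorrect_pals
instance (sampled_PALs : List (List String)) (num_incorrect_pals : Int) (out : String) : Decidable (Spec_get_INFO_STRING sampled_PALs num_incorrect_pals out) := by unfold Spec_get_INFO_STRING; infer_instance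

-- ===== CLAIM (what is proved, stated in full; the proofs are below) =====
def Claim_equal_get_INFO_STRING : Prop := ∀ (sampled_PALs : List (List String)) (num_incorrect_pals : Int), Dom_get_INFO_STRING sampled_PALs num_incorrect_pals → Pre_get_INFO_STRING sampled_PALs num_incorrect_pals → Spec_get_INFO_STRING sampled_PALs num_incorrect_pals (get_INFO_STRING sampled_PALs num_incorrect_pals)

-- ===== LEMMAS AND PROOFS =====

-- appending strings in a fold is the initial string ++ the join of the pieces
theorem foldl_concat_join : ∀ (L : List String) (s : String), L.foldl (· ++ ·) s = s ++ String.join L := by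
  intro L
  induction L with
  | nil => intro s; simp [String.join]
  | cons a L ih =>
    intro s
    show L.foldl (· ++ ·) (s ++ a) = s ++ String.join (a :: L)
    rw [ih (s ++ a)]
    have : String.join (a :: L) = a ++ String.join L := by
      show L.foldl (· ++ ·) ("" ++ a) = a ++ String.join L
      rw [ih ("" ++ a)]
      simp
    rw [this, String.append_assoc]

theorem join_cons (a : String) (L : List String) : String.join (a :: L) = a ++ String.join L := by
  show L.foldl (· ++ ·) ("" ++ a) = a ++ String.join L
  rw [foldl_concat_join]
  simp

theorem foldl_append_join {α : Type} (f : α → String) : ∀ (l : List α) (s : String),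
    l.foldl (fun s x => s ++ f x) s = s ++ String.join (l.map f) := by
  intro l
  induction l with
  | nil => intro s; simp [String.join]
  | cons x l ih =>
    intro s
    show l.foldl (fun s x => s ++ f x) (s ++ f x) = s ++ String.join (f x :: l.map f)
    rw [ih (s ++ f x), join_cons, String.append_assoc]

-- PySem.Set.ofList (first-occurrence dedup) from the left, as a filter
theorem ofList_cons_filter (x : String) (l : List String) :
    PySem.Set.ofList (x :: l) = x :: (PySem.Set.ofList l).filter (fun y => !(y == x)) := by
  have h1 : PySem.Set.ofList (x :: l) = PySem.Set.update [x] l := by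
    simp [PySem.Set.ofList_eq_foldl, PySem.Set.update, List.foldl_cons, PySem.Set.add]
  rw [h1, PySem.Set.update_eq_append_filter, List.singleton_append]
  congr 1
  apply List.filter_congr
  intro y _
  show (!(PySem.Set.contains [x] y)) = (!(y == x))
  by_cases h : y = x <;> simp [PySem.Set.contains, h]

-- dedup commutes with filter
theorem ofList_filter (p : String → Bool) : ∀ (l : List String),
    PySem.Set.ofList (l.filter p) = (PySem.Set.ofList l).filter p := by
  intro l
  induction l with
  | nil => rfl
  | cons y l ih =>
    by_cases hy : p y = true
    · rw [List.filter_cons_of_pos hy, ofList_cons_filter, ofList_cons_filter, ih,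
        List.filter_cons_of_pos hy, List.filter_filter, List.filter_filter]
      congr 1
      apply List.filter_congr
      intro a _
      rw [Bool.and_comm]
    · rw [List.filter_cons_of_neg hy, ofList_cons_filter, ih,
        List.filter_cons_of_neg hy, List.filter_filter]
      apply List.filter_congr
      intro a _
      by_cases hax : (a == y) = true
      · have : a = y := by simpa using hax
        subst this
        simp [hy]
      · simp [hax]

-- characterization of B's recursion: one line per distinct action (first-occurrence order)
theorem pvEmit_char : ∀ (xs : List (List String)),
    pvEmit xs = String.join ((PySem.Set.ofList (xs.map (fun q => PySem.List.pyGetD q 1 ""))).map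
      (fun a => ";; " ++ a ++ " action has changed: " ++
        String.join ((xs.filter (fun q => PySem.List.pyGetD q 1 "" == a)).map
          (fun q => PySem.List.pyGetD q 0 "" ++ ", ")) ++ "\n")) := by
  have H : ∀ (n : Nat) (xs : List (List String)), xs.length ≤ n →
      pvEmit xs = String.join ((PySem.Set.ofList (xs.map (fun q => PySem.List.pyGetD q 1 ""))).map
        (fun a => ";; " ++ a ++ " action has changed: " ++
          String.join ((xs.filter (fun q => PySem.List.pyGetD q 1 "" == a)).map
            (fun q => PySem.List.pyGetD q 0 "" ++ ", ")) ++ "\n")) := by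
    intro n
    induction n with
    | zero =>
      intro xs hlen
      have : xs = [] := List.eq_nil_of_length_eq_zero (Nat.le_zero.mp hlen)
      subst this
      simp [pvEmit, String.join]
    | succ n ih =>
      intro xs hlen
      cases xs with
      | nil => simp [pvEmit, String.join]
      | cons p rest' =>
        set action := PySem.List.pyGetD p 1 "" with haction
        set rest := (p :: rest').filter (fun q => !(PySem.List.pyGetD q 1 "" == action)) with hrest0
        have hrest : rest = rest'.filter (fun q => !(PySem.List.pyGetD q 1 "" == action)) := by
          rw [hrest0, List.filter_cons]
          simp only [haction.symm, beq_self_eq_true, Bool.not_true, Bool.false_eq_true, if_false]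
        have hlenrest : rest.length ≤ n := by
          rw [hrest]
          have := List.length_filter_le (fun q => !(PySem.List.pyGetD q 1 "" == action)) rest'
          simp only [List.length_cons] at hlen
          omega
        rw [pvEmit, ih rest hlenrest]
        -- RHS: split the dedup list at `action`
        have hmap : (p :: rest').map (fun q => PySem.List.pyGetD q 1 "") =
            action :: rest'.map (fun q => PySem.List.pyGetD q 1 "") := rfl
        rw [hmap, ofList_cons_filter]
        have hmapfilter : (rest'.map (fun q => PySem.List.pyGetD q 1 "")).filter (fun y => !(y == action)) =
            rest.map (fun q => PySem.List.pyGetD q 1 "") := by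
          rw [hrest, List.filter_map]
          rfl
        rw [← ofList_filter, hmapfilter, List.map_cons, join_cons]
        -- head lines match; tails: each per-action filter over p::rest' equals the one over rest
        congr 1
        congr 1
        apply List.map_congr_left
        intro a ha
        have ha' : a ∈ rest.map (fun q => PySem.List.pyGetD q 1 "") :=
          (PySem.Set.mem_ofList (rest.map (fun q => PySem.List.pyGetD q 1 "")) a).mp ha
        have hane : (action == a) = false := by
          rcases List.mem_map.mp ha' with ⟨q, hq, rfl⟩
          rw [hrest] at hq
          have h2 := List.of_mem_filter hq
          simp only [Bool.not_eq_true'] at h2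
          apply Bool.eq_false_iff.mpr
          intro hcon
          have heq : action = PySem.List.pyGetD q 1 "" := by simpa using hcon
          rw [← heq] at h2
          simp at h2
        have hfilter : (p :: rest').filter (fun q => PySem.List.pyGetD q 1 "" == a) =
            rest.filter (fun q => PySem.List.pyGetD q 1 "" == a) := by
          rw [List.filter_cons_of_neg (by simpa using hane), hrest, List.filter_filter]
          apply List.filter_congr
          intro q _
          by_cases hq : (PySem.List.pyGetD q 1 "" == a) = true
          · have heq : PySem.List.pyGetD q 1 "" = a := by simpa using hq
            rw [heq]
            have hrev : (a == action) = false := by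
              apply Bool.eq_false_iff.mpr
              intro hcon
              have : a = action := by simpa using hcon
              rw [this] at hane
              simp at hane
            simp [hrev]
          · simp [hq]
        rw [hfilter]
  intro xs
  exact H xs.length xs le_rfl

-- ===== A-side characterization (grouping dict as items list) =====

-- A's per-element dict update (ensure the key exists, then append) is one `modify`.
theorem stepA_eq_modify (d : PySem.Dict String (List (List String))) (PAL : List String) :
    (let a := PySem.List.pyGetD PAL 1 ""
     let d' := if d.contains a then d else d.insert a []
     d'.modify a [] (fun l => l ++ [PAL])) =
    d.modify (PySem.List.pyGetD PAL 1 "") [] (fun l => l ++ [PAL]) := by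
  set a := PySem.List.pyGetD PAL 1 "" with ha
  show (if d.contains a = true then d else d.insert a []).modify a [] (fun l => l ++ [PAL])
      = d.modify a [] (fun l => l ++ [PAL])
  by_cases h : d.contains a = true
  · rw [if_pos h]
  · rw [if_neg h]
    show (d.insert a []).insert a ((d.insert a []).getD a [] ++ [PAL]) = d.insert a (d.getD a [] ++ [PAL])
    rw [PySem.Dict.getD_insert_self, PySem.Dict.getD_of_not_contains d [] (by simpa using h),
        PySem.Dict.insert_insert_self]

-- items of a Nodup-keyed dict are its keys paired with their values.
theorem items_eq_keys_map (d : PySem.Dict String (List (List String)))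
    (h : d.keys.Nodup) :
    d.items = d.keys.map (fun k => (k, d.getD k [])) := by
  obtain ⟨l⟩ := d
  induction l with
  | nil => rfl
  | cons p rest ih =>
    obtain ⟨k, v⟩ := p
    simp only [PySem.Dict.keys_mk, List.map_cons] at h ⊢
    rw [List.nodup_cons] at h
    have hk : (PySem.Dict.mk ((k, v) :: rest)).getD k [] = v := by
      simp [PySem.Dict.getD_eq_get?_getD, PySem.Dict.get?_mk_cons]
    have hrest := ih (by simpa [PySem.Dict.keys_mk] using h.2)
    simp only [PySem.Dict.keys_mk] at hrest
    show (k, v) :: rest = _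
    rw [hk]
    congr 1
    calc rest = (rest.map (fun x => x.1)).map (fun k' => (k', (PySem.Dict.mk rest).getD k' [])) := hrest
      _ = (rest.map (fun x => x.1)).map (fun k' => (k', (PySem.Dict.mk ((k, v) :: rest)).getD k' [])) := by
          apply List.map_congr_left
          intro k' hk'
          have hne : ¬ (k == k') = true := by
            simp only [beq_iff_eq]
            rintro rfl
            exact h.1 hk'
          simp [PySem.Dict.getD_eq_get?_getD, PySem.Dict.get?_mk_cons, hne]

-- A's grouping dict, as a list of items: distinct actions in first-occurrence
-- order, each paired with the sublist of PALs carrying that action.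
theorem dict_items_char (xs : List (List String)) :
    (xs.foldl (fun d PAL =>
        d.modify (PySem.List.pyGetD PAL 1 "") [] (fun l => l ++ [PAL]))
        (PySem.Dict.empty : PySem.Dict String (List (List String)))).items
      = (PySem.Set.ofList (xs.map (fun PAL => PySem.List.pyGetD PAL 1 ""))).map
          (fun a => (a, xs.filter (fun PAL => PySem.List.pyGetD PAL 1 "" == a))) := by
  set key : List String → String := fun PAL => PySem.List.pyGetD PAL 1 "" with hkey
  set d := xs.foldl (fun d PAL => d.modify (key PAL) [] (fun l => l ++ [PAL]))
      (PySem.Dict.empty : PySem.Dict String (List (List String))) with hd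
  have hnd : d.keys.Nodup :=
    PySem.Dict.nodup_keys_foldl_modify_key xs key [] (fun _ PAL v => v ++ [PAL]) _
      PySem.Dict.nodup_keys_empty
  have hkeys : d.keys = PySem.Set.ofList (xs.map key) := by
    rw [hd, PySem.Dict.keys_foldl_modify_key xs key [] (fun _ PAL v => v ++ [PAL])]
    rfl
  have hgetD : ∀ a, d.getD a [] = xs.filter (fun PAL => key PAL == a) := by
    intro a
    have hfold : d = (xs.map (fun PAL => (key PAL, PAL))).foldl
        (fun d p => d.modify p.1 [] (fun l => l ++ [p.2])) PySem.Dict.empty := by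
      rw [hd, List.foldl_map]
    rw [hfold, PySem.Dict.getD_foldl_modify_append]
    simp [List.filter_map, Function.comp_def]
  rw [items_eq_keys_map d hnd, hkeys]
  apply List.map_congr_left
  intro a _
  rw [hgetD a]

theorem main_eq (xs : List (List String)) (n : Int) :
    get_INFO_STRING xs n = get_INFO_STRING_alt xs n := by
  show ((xs.foldl (fun d PAL =>
      let _predicate := PySem.List.pyGetD PAL 0 ""
      let action := PySem.List.pyGetD PAL 1 ""
      let d := if d.contains action then d else d.insert action []
      d.modify action [] (fun l => l ++ [PAL]))
      (PySem.Dict.empty : PySem.Dict String (List (List String)))).items.foldl (fun s item =>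
        ((item.2.foldl (fun s PAL => s ++ PySem.List.pyGetD PAL 0 "" ++ ", ")
          (s ++ ";; " ++ item.1 ++ " action has changed: ")) ++ "\n")) "\n")
    = "\n" ++ pvEmit xs
  have hstep : (fun (d : PySem.Dict String (List (List String))) (PAL : List String) =>
      let _predicate := PySem.List.pyGetD PAL 0 ""
      let action := PySem.List.pyGetD PAL 1 ""
      let d := if d.contains action then d else d.insert action []
      d.modify action [] (fun l => l ++ [PAL])) =
      (fun d PAL => d.modify (PySem.List.pyGetD PAL 1 "") [] (fun l => l ++ [PAL])) := by
    funext d PAL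
    exact stepA_eq_modify d PAL
  rw [hstep, dict_items_char, pvEmit_char]
  -- reshape A's nested folds into "\n" ++ join of per-action lines
  have hbody : ∀ (s : String) (item : String × List (List String)),
      (item.2.foldl (fun s PAL => s ++ PySem.List.pyGetD PAL 0 "" ++ ", ")
        (s ++ ";; " ++ item.1 ++ " action has changed: ")) ++ "\n"
      = s ++ (";; " ++ item.1 ++ " action has changed: " ++
          String.join (item.2.map (fun PAL => PySem.List.pyGetD PAL 0 "" ++ ", ")) ++ "\n") := by
    intro s item
    have := foldl_append_join (fun PAL : List String => PySem.List.pyGetD PAL 0 "" ++ ", ")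
      item.2 (s ++ ";; " ++ item.1 ++ " action has changed: ")
    have h2 : (fun (s : String) (PAL : List String) => s ++ PySem.List.pyGetD PAL 0 "" ++ ", ")
        = (fun s PAL => s ++ (PySem.List.pyGetD PAL 0 "" ++ ", ")) := by
      funext s PAL; rw [String.append_assoc]
    rw [h2, this]
    simp [String.append_assoc]
  have hfold : ∀ (L : List (String × List (List String))) ,
      L.foldl (fun s item =>
        ((item.2.foldl (fun s PAL => s ++ PySem.List.pyGetD PAL 0 "" ++ ", ")
          (s ++ ";; " ++ item.1 ++ " action has changed: ")) ++ "\n")) "\n"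
      = "\n" ++ String.join (L.map (fun item => ";; " ++ item.1 ++ " action has changed: " ++
          String.join (item.2.map (fun PAL => PySem.List.pyGetD PAL 0 "" ++ ", ")) ++ "\n")) := by
    intro L
    have hfn : (fun (s : String) (item : String × List (List String)) =>
        ((item.2.foldl (fun s PAL => s ++ PySem.List.pyGetD PAL 0 "" ++ ", ")
          (s ++ ";; " ++ item.1 ++ " action has changed: ")) ++ "\n"))
        = (fun s item => s ++ (";; " ++ item.1 ++ " action has changed: " ++
            String.join (item.2.map (fun PAL => PySem.List.pyGetD PAL 0 "" ++ ", ")) ++ "\n")) := by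
      funext s item; exact hbody s item
    rw [hfn, foldl_append_join]
  rw [hfold, List.map_map]
  rfl

-- ===== VERDICT (by name: the statement is the Claim_ definition above) =====
theorem get_INFO_STRING_spec : Claim_equal_get_INFO_STRING := by
  intro xs n _ _
  unfold Spec_get_INFO_STRING
  exact main_eq xs n
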